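-- pv_equiv track=rewrite | github.com/pypi-data/pypi-mirror-3 | packages/knife/knife-0.5.2.zip/knife-0.5.2/knife/_compat.py | count
-- ===== SOURCE A (Python) =====
-- def count(iterable, enumerate=enumerate, next=next, iter=iter):
--     counter = enumerate(iterable, 1)
--     idx = ()
--     while 1:
--         try:
--             idx = next(counter)
--         except StopIteration:
--             return next(iter(idx), 0)
-- ===== SOURCE B (Python) =====
-- def count(iterable, enumerate=enumerate, next=next, iter=iter):
--     return len(list(iterable))
-- ===== Notes on version B (the rewrite author's own statement) =====
-- stated objective: idiomatic
-- what changed: Replaces the enumerate/StopIteration streaming loop that extracts the last enumeration index with materializing the iterable into a list and returning its length.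
import Mathlib
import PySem

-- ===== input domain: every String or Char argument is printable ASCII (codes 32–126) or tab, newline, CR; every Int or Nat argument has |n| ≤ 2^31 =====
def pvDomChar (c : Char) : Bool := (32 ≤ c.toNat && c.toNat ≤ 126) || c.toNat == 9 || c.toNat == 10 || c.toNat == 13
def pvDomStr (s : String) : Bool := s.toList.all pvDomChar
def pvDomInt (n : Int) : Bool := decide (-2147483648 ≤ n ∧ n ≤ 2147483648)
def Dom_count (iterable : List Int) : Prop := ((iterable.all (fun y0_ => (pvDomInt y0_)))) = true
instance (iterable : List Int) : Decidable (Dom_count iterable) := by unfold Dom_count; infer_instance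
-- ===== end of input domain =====

-- B replaces A's enumerate/StopIteration loop (keep last index) with len(list(iterable)); idiomatic.

-- ===== PORT A =====
-- enumerate(iterable, 1): pairs (index, value) starting at 1
def countEnum (n : Int) : List Int → List (Int × Int)
  | [] => []
  | x :: xs => (n, x) :: countEnum (n + 1) xs

-- the while-1 loop: idx holds the last pair drawn (none models the initial ());
-- on StopIteration return next(iter(idx), 0) = idx's first component, or 0 for ()
def countLoop (counter : List (Int × Int)) (idx : Option (Int × Int)) : Int :=
  match counter with
  | [] =>
    match idx with
    | some p => p.1
    | none => 0
  | p :: rest => countLoop rest (some p)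

def count (iterable : List Int) : Int :=
  countLoop (countEnum 1 iterable) none

-- ===== PORT B =====
def count_alt (iterable : List Int) : Int := (iterable.length : Int)

-- ===== PRECONDITION & SPEC =====
def Spec_count (iterable : List Int) (out : Int) : Prop := out = count_alt iterable
instance (iterable : List Int) (out : Int) : Decidable (Spec_count iterable out) := by unfold Spec_count; infer_instance

-- ===== CLAIM (what is proved, stated in full; the proofs are below) =====
def Claim_equal_count : Prop := ∀ (iterable : List Int), Dom_count iterable → Spec_count iterable (count iterable)

-- ===== LEMMAS AND PROOFS =====
theorem countLoop_enum (l : List Int) : ∀ (n : Int) (idx : Option (Int × Int)),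
    countLoop (countEnum n l) idx =
      (if l = [] then (match idx with | some p => p.1 | none => 0) else n + l.length - 1) := by
  induction l with
  | nil => intro n idx; simp [countEnum, countLoop]
  | cons x xs ih =>
    intro n idx
    simp only [countEnum, countLoop, ih]
    by_cases h : xs = []
    · simp [h]
    · simp only [h, if_false, List.cons_ne_nil, List.length_cons]
      push_cast
      ring

-- ===== VERDICT (by name: the statement is the Claim_ definition above) =====
theorem count_spec : Claim_equal_count := by
  intro l _
  unfold Spec_count count count_alt
  rw [countLoop_enum]
  by_cases h : l = [] <;> simp [h]
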